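-- pv_equiv track=rewrite | github.com/li-chunyu/ccf | 201803-3.py | map_func
-- ===== SOURCE A (Python) =====
-- def map_func(maps, uri):
--     uri = uri.lstrip('/').split('/')
--     ret_inf = None
--     ret_param = None
--     for m in maps:
--         flag = True
--         rules, intf = m
--         rules_idx = 0
--         uri_idx = 0
--         params = []
--         while rules_idx < len(rules):
--             if uri_idx >= len(uri):
--                 flag = False
--                 break
--             if rules[rules_idx].find('<') == -1:
--                 if uri[uri_idx] != rules[rules_idx]:
--                     flag = False
--                     break
--             elif rules[rules_idx] == '<int>':
--                 if not uri[uri_idx].isdigit():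
--                     flag = False
--                     break
--                 else:
--                     params.append(str(int(uri[uri_idx])))
--             elif rules[rules_idx] == '<str>':
--                 params.append(uri[uri_idx])
--             elif rules[rules_idx] == '<path>':
--                 params.append('/'.join(uri[uri_idx:]))
--                 flag = True
--                 break
--             rules_idx += 1
--             uri_idx += 1
--         if flag:
--             ret_inf = intf
--             ret_param = params
--     return ret_inf, ret_param
-- ===== SOURCE B (Python) =====
-- def _match(rules, segs):
--     # recursive matcher: list of params on success, None on failure
--     if not rules:
--         return []
--     if not segs:
--         return None
--     rule, seg = rules[0], segs[0]
--     if rule == '<path>':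
--         return ['/'.join(segs)]
--     if rule == '<int>':
--         if not seg.isdigit():
--             return None
--         rest = _match(rules[1:], segs[1:])
--         return None if rest is None else [str(int(seg))] + rest
--     if rule == '<str>':
--         rest = _match(rules[1:], segs[1:])
--         return None if rest is None else [seg] + rest
--     if '<' not in rule:
--         return _match(rules[1:], segs[1:]) if seg == rule else None
--     return _match(rules[1:], segs[1:])
--
-- def map_func(maps, uri):
--     segs = uri.lstrip('/').split('/')
--     for rules, intf in reversed(maps):
--         params = _match(rules, segs)
--         if params is not None:
--             return intf, params
--     return None, None
-- ===== Notes on version B (the rewrite author's own statement) =====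
-- stated objective: alternative
-- what changed: A scans all maps with an index-based while loop keeping the last match in mutable accumulators; B extracts a recursive per-rule matcher returning Optional params and searches the reversed map list for the first success, returning early.
import Mathlib
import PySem

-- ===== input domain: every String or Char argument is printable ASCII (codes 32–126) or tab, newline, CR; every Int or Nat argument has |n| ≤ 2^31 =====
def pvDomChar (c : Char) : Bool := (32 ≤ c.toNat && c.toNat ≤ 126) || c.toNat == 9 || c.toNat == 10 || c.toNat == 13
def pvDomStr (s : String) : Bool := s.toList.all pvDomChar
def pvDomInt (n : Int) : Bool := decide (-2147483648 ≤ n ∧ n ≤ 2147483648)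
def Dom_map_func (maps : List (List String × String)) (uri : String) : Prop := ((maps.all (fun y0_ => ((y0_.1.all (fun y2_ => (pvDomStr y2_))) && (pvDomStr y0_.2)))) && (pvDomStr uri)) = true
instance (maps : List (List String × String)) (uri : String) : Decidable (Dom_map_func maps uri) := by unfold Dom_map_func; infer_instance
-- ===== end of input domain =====

-- B re-decomposes A's keep-last-match scan as a recursive per-rule matcher plus a
-- first-match search over the reversed map list (objective: alternative decomposition, same cost).

-- shared preprocessing: uri.lstrip('/').split('/').
-- lstrip('/') is ported by hand as dropWhile (· == '/') — exact for a one-character chars set;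
-- split('/') is PySem.Str.split? with the nonempty literal separator, so .getD [] is never taken.
def pvSplitUri (uri : String) : List String :=
  (PySem.Str.split? (String.ofList (uri.toList.dropWhile (· == '/'))) "/").getD []

-- ===== PORT A =====
-- A's while loop over rules_idx/uri_idx, as structural recursion on the two lists;
-- int(seg) is guarded by isdigit, so (ofStr? u).getD 0 never takes the default.
def pvAInner : List String → List String → List String → Bool × List String
  | [], _, params => (true, params)
  | _ :: _, [], params => (false, params)
  | r :: rs, u :: us, params =>
    if PySem.Str.find r "<" = -1 then
      if u ≠ r then (false, params) else pvAInner rs us params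
    else if r = "<int>" then
      if !(PySem.Str.strIsdigit u) then (false, params)
      else pvAInner rs us (params ++ [PySem.Int.toStr ((PySem.Int.ofStr? u).getD 0)])
    else if r = "<str>" then pvAInner rs us (params ++ [u])
    else if r = "<path>" then (true, params ++ [PySem.Str.join "/" (u :: us)])
    else pvAInner rs us params

def map_func (maps : List (List String × String)) (uri : String) : Option String × Option (List String) :=
  let segs := pvSplitUri uri
  maps.foldl (fun acc m =>
    let fp := pvAInner m.1 segs []
    if fp.1 then (some m.2, some fp.2) else acc) (none, none)

-- ===== PORT B =====
-- B's recursive matcher: params list on success, none on failure (Source B's _match).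
def pvBMatch : List String → List String → Option (List String)
  | [], _ => some []
  | _ :: _, [] => none
  | r :: rs, u :: us =>
    if r = "<path>" then some [PySem.Str.join "/" (u :: us)]
    else if r = "<int>" then
      if PySem.Str.strIsdigit u then
        match pvBMatch rs us with
        | none => none
        | some rest => some (PySem.Int.toStr ((PySem.Int.ofStr? u).getD 0) :: rest)
      else none
    else if r = "<str>" then
      match pvBMatch rs us with
      | none => none
      | some rest => some (u :: rest)
    else if PySem.Str.isIn "<" r = false then
      if u = r then pvBMatch rs us else none
    else pvBMatch rs us

-- first-match search (Source B's loop over reversed(maps) with early return)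
def pvBFind : List (List String × String) → List String → Option String × Option (List String)
  | [], _ => (none, none)
  | m :: ms, segs =>
    match pvBMatch m.1 segs with
    | some ps => (some m.2, some ps)
    | none => pvBFind ms segs

def map_func_alt (maps : List (List String × String)) (uri : String) : Option String × Option (List String) :=
  pvBFind maps.reverse (pvSplitUri uri)

-- ===== PRECONDITION & SPEC =====
def Spec_map_func (maps : List (List String × String)) (uri : String) (out : Option String × Option (List String)) : Prop := out = map_func_alt maps uri
instance (maps : List (List String × String)) (uri : String) (out : Option String × Option (List String)) : Decidable (Spec_map_func maps uri out) := by unfold Spec_map_func; infer_instance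

-- ===== CLAIM (what is proved, stated in full; the proofs are below) =====
def Claim_equal_map_func : Prop := ∀ (maps : List (List String × String)) (uri : String), Dom_map_func maps uri → Spec_map_func maps uri (map_func maps uri)

-- ===== LEMMAS AND PROOFS =====

lemma pv_find_isIn (r : String) : (PySem.Str.find r "<" = -1) ↔ (PySem.Str.isIn "<" r = false) := by
  simp [PySem.Chars.find_eq_neg_one_iff, PySem.Chars.isIn_eq_false_iff]

-- success of B's matcher determines A's inner loop result
lemma pv_inner_some : ∀ (rs us : List String) (q : List String), pvBMatch rs us = some q →
    ∀ ps, pvAInner rs us ps = (true, ps ++ q) := by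
  intro rs
  induction rs with
  | nil =>
    intro us q hq ps
    simp [pvBMatch] at hq
    simp [pvAInner, hq]
  | cons r rs ih =>
    intro us q hq ps
    cases us with
    | nil => simp [pvBMatch] at hq
    | cons u us =>
      by_cases hp : r = "<path>"
      · subst hp
        simp [pvBMatch] at hq
        rw [pvAInner, if_neg (by decide), if_neg (by decide), if_neg (by decide), if_pos rfl, ← hq]
      · by_cases hi : r = "<int>"
        · subst hi
          rw [pvBMatch] at hq
          rw [if_neg (by decide), if_pos rfl] at hq
          rw [pvAInner, if_neg (by decide), if_pos rfl]
          cases hd : PySem.Str.strIsdigit u with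
          | false => rw [hd] at hq; simp at hq
          | true =>
            rw [hd] at hq
            cases hm : pvBMatch rs us with
            | none => rw [hm] at hq; simp at hq
            | some rest =>
              rw [hm] at hq
              simp at hq
              simp only [Bool.not_true, Bool.false_eq_true, if_false]
              rw [ih us rest hm, ← hq]
              simp
        · by_cases hs : r = "<str>"
          · subst hs
            rw [pvBMatch, if_neg (by decide), if_neg (by decide), if_pos rfl] at hq
            rw [pvAInner, if_neg (by decide), if_neg (by decide), if_pos rfl]
            cases hm : pvBMatch rs us with
            | none => rw [hm] at hq; simp at hq
            | some rest =>
              rw [hm] at hq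
              simp only [Option.some.injEq] at hq
              rw [ih us rest hm, ← hq]
              simp
          · rw [pvBMatch, if_neg hp, if_neg hi, if_neg hs] at hq
            rw [pvAInner]
            by_cases hlt : PySem.Str.isIn "<" r = false
            · rw [if_pos hlt] at hq
              rw [if_pos ((pv_find_isIn r).mpr hlt)]
              by_cases hu : u = r
              · rw [if_pos hu] at hq
                rw [if_neg (by simpa using hu)]
                exact ih us q hq ps
              · rw [if_neg hu] at hq; simp at hq
            · rw [if_neg hlt] at hq
              rw [if_neg (fun h => hlt ((pv_find_isIn r).mp h)), if_neg hi, if_neg hs, if_neg hp]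
              exact ih us q hq ps

-- failure of B's matcher forces A's flag to false
lemma pv_inner_none : ∀ (rs us : List String), pvBMatch rs us = none →
    ∀ ps, (pvAInner rs us ps).1 = false := by
  intro rs
  induction rs with
  | nil => intro us hq ps; simp [pvBMatch] at hq
  | cons r rs ih =>
    intro us hq ps
    cases us with
    | nil => simp [pvAInner]
    | cons u us =>
      by_cases hp : r = "<path>"
      · subst hp; simp [pvBMatch] at hq
      · by_cases hi : r = "<int>"
        · subst hi
          rw [pvBMatch, if_neg (by decide), if_pos rfl] at hq
          rw [pvAInner, if_neg (by decide), if_pos rfl]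
          cases hd : PySem.Str.strIsdigit u with
          | false => simp
          | true =>
            rw [hd] at hq
            cases hm : pvBMatch rs us with
            | none =>
              simp only [Bool.not_true, Bool.false_eq_true, if_false]
              exact ih us hm _
            | some rest => rw [hm] at hq; simp at hq
        · by_cases hs : r = "<str>"
          · subst hs
            rw [pvBMatch, if_neg (by decide), if_neg (by decide), if_pos rfl] at hq
            rw [pvAInner, if_neg (by decide), if_neg (by decide), if_pos rfl]
            cases hm : pvBMatch rs us with
            | none => exact ih us hm _
            | some rest => rw [hm] at hq; simp at hq
          · rw [pvBMatch, if_neg hp, if_neg hi, if_neg hs] at hq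
            rw [pvAInner]
            by_cases hlt : PySem.Str.isIn "<" r = false
            · rw [if_pos hlt] at hq
              rw [if_pos ((pv_find_isIn r).mpr hlt)]
              by_cases hu : u = r
              · rw [if_pos hu] at hq
                rw [if_neg (by simpa using hu)]
                exact ih us hq ps
              · rw [if_pos (by simpa using hu)]
            · rw [if_neg hlt] at hq
              rw [if_neg (fun h => hlt ((pv_find_isIn r).mp h)), if_neg hi, if_neg hs, if_neg hp]
              exact ih us hq ps

lemma pv_bfind_append (xs ys : List (List String × String)) (segs : List String) :
    pvBFind (xs ++ ys) segs =
      (if pvBFind xs segs = (none, none) then pvBFind ys segs else pvBFind xs segs) := by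
  induction xs with
  | nil => simp [pvBFind]
  | cons m ms ih =>
    cases hm : pvBMatch m.1 segs with
    | some ps => simp [pvBFind, hm]
    | none => simpa [pvBFind, hm] using ih

lemma pv_loop_eq (segs : List String) : ∀ (ms : List (List String × String))
    (acc : Option String × Option (List String)),
    ms.foldl (fun acc m =>
        let fp := pvAInner m.1 segs []
        if fp.1 then (some m.2, some fp.2) else acc) acc =
      (if pvBFind ms.reverse segs = (none, none) then acc else pvBFind ms.reverse segs) := by
  intro ms
  induction ms with
  | nil => intro acc; simp [pvBFind]
  | cons m ms ih =>
    intro acc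
    rw [List.foldl_cons, ih, List.reverse_cons, pv_bfind_append]
    by_cases h : pvBFind ms.reverse segs = (none, none)
    · rw [if_pos h, if_pos h]
      cases hm : pvBMatch m.1 segs with
      | some q =>
        rw [show pvBFind [m] segs = (some m.2, some q) by simp [pvBFind, hm]]
        simp [pv_inner_some m.1 segs q hm []]
      | none =>
        rw [show pvBFind [m] segs = (none, none) by simp [pvBFind, hm]]
        simp [pv_inner_none m.1 segs hm []]
    · rw [if_neg h, if_neg h, if_neg h]

-- ===== VERDICT (by name: the statement is the Claim_ definition above) =====
theorem map_func_spec : Claim_equal_map_func := by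
  intro maps uri _
  unfold Spec_map_func map_func map_func_alt
  rw [pv_loop_eq (pvSplitUri uri) maps (none, none)]
  by_cases h : pvBFind maps.reverse (pvSplitUri uri) = (none, none)
  · rw [if_pos h, h]
  · rw [if_neg h]
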